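-- pv_equiv track=rewrite | github.com/jskim7018/leetcode_study | algorithm_study/2026/03/20260330/hard/LC_3886.py | sortableIntegers
-- ===== SOURCE A (Python) =====
-- def sortableIntegers(nums: list[int]) -> int:
--     # n의 factor 들의 모두 후보.
--     # n으로 검증 가능 그러므로 n * sqrt(n) 가능
--     n = len(nums)
--     factors = []
--     for i in range(1, int(n**0.5) + 1):
--         if n % i == 0:
--             factors.append(i)
--         if n % i == 0 and n//i != i:
--             factors.append(n//i)
--
--     sorted_nums = list(sorted(nums))
--
--     ans = 0
--     for k in factors:
--         is_possible = True
--         for i in range(0, n, k):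
--             curr = 0
--             for j in range(1, k):
--                 if nums[j-1+i] > nums[j+i]:
--                     curr = j
--                     break
--             for j in range(k):
--                 if sorted_nums[j+i] != nums[curr + i]:
--                     is_possible = False
--                     break
--                 curr = (curr + 1) % k
--             if not is_possible:
--                 break
--         if is_possible:
--             ans += k
--
--     return ans
-- ===== SOURCE B (Python) =====
-- def sortableIntegers(nums: list[int]) -> int:
--     # Same divisor enumeration; each k-block is validated by the classic
--     # rotation test: the block must be a contiguous length-k window of the
--     # doubled globally-sorted slice.
--     n = len(nums)
--     factors = []
--     for i in range(1, int(n**0.5) + 1):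
--         if n % i == 0:
--             factors.append(i)
--         if n % i == 0 and n // i != i:
--             factors.append(n // i)
--
--     s = sorted(nums)
--
--     ans = 0
--     for k in factors:
--         if all(_is_rotation_of_sorted_block(nums, s, i, k) for i in range(0, n, k)):
--             ans += k
--     return ans
--
--
-- def _is_rotation_of_sorted_block(nums, s, i, k):
--     blk = nums[i:i + k]
--     doubled = s[i:i + k] + s[i:i + k]
--     return any(doubled[t:t + k] == blk for t in range(k))
-- ===== Notes on version B (the rewrite author's own statement) =====
-- stated objective: alternative
-- what changed: Block validation replaced: instead of locating the first descent and walking indices cyclically mod k against the sorted array, B checks that each k-block is a contiguous length-k window of the doubled globally-sorted slice (the classic rotation test).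
import Mathlib
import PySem

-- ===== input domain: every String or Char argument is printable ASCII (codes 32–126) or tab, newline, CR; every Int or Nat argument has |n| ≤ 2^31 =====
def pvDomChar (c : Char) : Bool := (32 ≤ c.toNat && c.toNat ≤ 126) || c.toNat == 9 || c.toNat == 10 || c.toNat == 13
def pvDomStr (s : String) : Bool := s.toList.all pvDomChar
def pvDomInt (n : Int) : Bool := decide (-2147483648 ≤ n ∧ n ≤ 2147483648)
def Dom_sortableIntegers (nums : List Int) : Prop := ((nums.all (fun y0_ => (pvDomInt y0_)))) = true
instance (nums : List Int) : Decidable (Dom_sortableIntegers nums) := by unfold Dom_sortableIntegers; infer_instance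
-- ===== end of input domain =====

-- B replaces A's descent-finding block check by the classic rotation-window test on the doubled sorted slice (alternative algorithm, same cost class).

-- ===== PORT A =====
-- int(n**0.5) on a list length is exactly Nat.sqrt n (float sqrt is exact for these magnitudes)
def pvFactorsA (n : Nat) : List Nat :=
  (List.range' 1 (Nat.sqrt n)).foldl (fun acc i =>
    let acc := if n % i == 0 then acc ++ [i] else acc
    if n % i == 0 && !(n / i == i) then acc ++ [n / i] else acc) []

-- 'for j in range(1, k): if nums[j-1+i] > nums[j+i]: curr = j; break' (curr defaults to 0)
def pvFindCurr (nums : List Int) (i k : Nat) : Nat :=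
  match (List.range' 1 (k - 1)).find?
      (fun j => decide (nums.getD (j - 1 + i) 0 > nums.getD (j + i) 0)) with
  | some j => j
  | none => 0

-- 'for j in range(k): if sorted_nums[j+i] != nums[curr+i]: fail; curr = (curr+1) % k'
def pvCheckBlockA (nums sorted_nums : List Int) (i k : Nat) : Bool :=
  ((List.range k).foldl (fun (st : Bool × Nat) j =>
      if st.1 then
        if sorted_nums.getD (j + i) 0 != nums.getD (st.2 + i) 0 then (false, st.2)
        else (true, (st.2 + 1) % k)
      else st)
    (true, pvFindCurr nums i k)).1

-- 'for i in range(0, n, k): … if not is_possible: break'  (k divides n in every call)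
def pvBlocksA (nums sorted_nums : List Int) (n k : Nat) : Bool :=
  (List.range (n / k)).foldl
    (fun ok t => if ok then pvCheckBlockA nums sorted_nums (t * k) k else ok) true

def sortableIntegers (nums : List Int) : Int :=
  let n := nums.length
  let factors := pvFactorsA n
  let sorted_nums := PySem.List.sorted nums (fun x => x) false
  factors.foldl (fun ans k => if pvBlocksA nums sorted_nums n k then ans + (k : Int) else ans) 0

-- ===== PORT B =====
def pvFactorsB (n : Nat) : List Nat :=
  (List.range' 1 (Nat.sqrt n)).foldl (fun acc i =>
    let acc := if n % i == 0 then acc ++ [i] else acc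
    if n % i == 0 && !(n / i == i) then acc ++ [n / i] else acc) []

-- 'doubled = s[i:i+k] + s[i:i+k]; any(doubled[t:t+k] == nums[i:i+k] for t in range(k))'
-- slices with 0 ≤ i and nonneg bounds are drop/take (same clamping as Python)
def pvRotWindowB (nums s : List Int) (i k : Nat) : Bool :=
  let blk := (nums.drop i).take k
  let doubled := (s.drop i).take k ++ (s.drop i).take k
  (List.range k).any (fun t => (doubled.drop t).take k == blk)

def pvBlocksB (nums s : List Int) (n k : Nat) : Bool :=
  (List.range (n / k)).all (fun t => pvRotWindowB nums s (t * k) k)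

def sortableIntegers_alt (nums : List Int) : Int :=
  let n := nums.length
  let factors := pvFactorsB n
  let s := PySem.List.sorted nums (fun x => x) false
  factors.foldl (fun ans k => if pvBlocksB nums s n k then ans + (k : Int) else ans) 0

-- ===== PRECONDITION & SPEC =====
def Spec_sortableIntegers (nums : List Int) (out : Int) : Prop := out = sortableIntegers_alt nums
instance (nums : List Int) (out : Int) : Decidable (Spec_sortableIntegers nums out) := by unfold Spec_sortableIntegers; infer_instance

-- ===== CLAIM (what is proved, stated in full; the proofs are below) =====
def Claim_equal_sortableIntegers : Prop := ∀ (nums : List Int), Dom_sortableIntegers nums → Spec_sortableIntegers nums (sortableIntegers nums)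

-- ===== LEMMAS AND PROOFS =====

-- rotate-left by t
def pvRot (l : List Int) (t : Nat) : List Int := l.drop t ++ l.take t

theorem pvRot_zero (l : List Int) : pvRot l 0 = l := by simp [pvRot]

theorem pvRot_rot (l : List Int) (c : Nat) (hc : c ≤ l.length) :
    pvRot (pvRot l c) (l.length - c) = l := by
  unfold pvRot
  have h1 : (l.drop c).length = l.length - c := by simp
  rw [← h1, List.drop_left, List.take_left, List.take_append_drop]

theorem pvRot_perm (l : List Int) (t : Nat) : (pvRot l t).Perm l := by
  have := List.perm_append_comm (l₁ := l.drop t) (l₂ := l.take t)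
  simpa [pvRot, List.take_append_drop] using this

theorem getD_rot (l : List Int) (c t k : Nat) (hl : l.length = k) (hc : c < k) (ht : t < k) :
    (pvRot l c).getD t 0 = l.getD ((c + t) % k) 0 := by
  simp only [List.getD_eq_getElem?_getD, pvRot]
  rcases Nat.lt_or_ge t (k - c) with h | h
  · rw [List.getElem?_append_left (by simp; omega)]
    rw [List.getElem?_drop]
    have : (c + t) % k = c + t := Nat.mod_eq_of_lt (by omega)
    rw [this]
  · rw [List.getElem?_append_right (by simp; omega)]
    have hlen : (l.drop c).length = k - c := by simp [hl]
    rw [hlen, List.getElem?_take_of_lt (by omega)]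
    have : (c + t) % k = t - (k - c) := by
      have h2 : c + t = (t - (k - c)) + k := by omega
      rw [h2, Nat.add_mod_right]
      exact Nat.mod_eq_of_lt (by omega)
    rw [this]

-- slices
theorem getD_slice (l : List Int) (i k j : Nat) (hik : i + k ≤ l.length) (hj : j < k) :
    ((l.drop i).take k).getD j 0 = l.getD (j + i) 0 := by
  simp only [List.getD_eq_getElem?_getD]
  rw [List.getElem?_take_of_lt hj, List.getElem?_drop, Nat.add_comm]

theorem length_slice_eq (l : List Int) (i k : Nat) (hik : i + k ≤ l.length) :
    ((l.drop i).take k).length = k := by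
  simp; omega

-- window of the doubled list is a rotation
theorem window_eq_rot (ss : List Int) (k t : Nat) (hlen : ss.length = k) (ht : t < k) :
    ((ss ++ ss).drop t).take k = pvRot ss t := by
  rw [List.drop_append_of_le_length (by omega), List.take_append]
  rw [List.take_of_length_le (by simp; omega)]
  have : k - (ss.drop t).length = t := by simp [hlen]; omega
  rw [this, pvRot]

-- factors invariant
theorem factors_aux (n : Nat) : ∀ (l : List Nat) (acc : List Nat),
    (∀ x ∈ acc, 1 ≤ x ∧ n % x = 0) → (∀ i ∈ l, 1 ≤ i ∧ i ≤ Nat.sqrt n) →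
    ∀ k ∈ l.foldl (fun acc i =>
      let acc := if n % i == 0 then acc ++ [i] else acc
      if n % i == 0 && !(n / i == i) then acc ++ [n / i] else acc) acc,
      1 ≤ k ∧ n % k = 0 := by
  intro l
  induction l with
  | nil => intro acc hacc _ k hk; exact hacc k hk
  | cons i l ih =>
    intro acc hacc hl k hk
    obtain ⟨hi1, hi2⟩ := hl i (by simp)
    have hn1 : 1 ≤ n := le_trans (le_trans hi1 hi2) (Nat.sqrt_le_self n)
    refine ih _ ?_ (fun x hx => hl x (by simp [hx])) k hk
    intro x hx
    simp only at hx
    split at hx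
    · rename_i hcond
      simp only [Bool.and_eq_true, beq_iff_eq, Bool.not_eq_eq_eq_not, Bool.not_true,
        beq_eq_false_iff_ne] at hcond
      rw [List.mem_append, List.mem_singleton] at hx
      rcases hx with hx | hx
      · split at hx
        · rename_i hmod
          simp only [beq_iff_eq] at hmod
          rw [List.mem_append, List.mem_singleton] at hx
          rcases hx with hx | hx
          · exact hacc x hx
          · subst hx; exact ⟨hi1, hmod⟩
        · exact hacc x hx
      · subst hx
        have hdvd : i ∣ n := Nat.dvd_of_mod_eq_zero hcond.1
        constructor
        · exact Nat.one_le_div_iff (by omega) |>.mpr (le_trans hi2 (Nat.sqrt_le_self n))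
        · exact Nat.mod_eq_zero_of_dvd (Nat.div_dvd_of_dvd hdvd)
    · rename_i hcond
      split at hx
      · rename_i hmod
        simp only [beq_iff_eq] at hmod
        rw [List.mem_append, List.mem_singleton] at hx
        rcases hx with hx | hx
        · exact hacc x hx
        · subst hx; exact ⟨hi1, hmod⟩
      · exact hacc x hx

theorem mem_pvFactorsA (n k : Nat) (hk : k ∈ pvFactorsA n) : 1 ≤ k ∧ n % k = 0 := by
  refine factors_aux n _ [] (by simp) ?_ k hk
  intro i hi
  rw [List.mem_range'_1] at hi
  omega

-- find? congruence on members
theorem find?_congr_mem {α : Type} (l : List α) (p q : α → Bool)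
    (h : ∀ x ∈ l, p x = q x) : l.find? p = l.find? q := by
  induction l with
  | nil => rfl
  | cons x l ih =>
    simp only [List.find?]
    rw [h x (by simp)]
    split
    · rfl
    · exact ih (fun y hy => h y (by simp [hy]))

-- A's inner loop step, named for stable rewriting
def pvStepA (nums s : List Int) (i k : Nat) (st : Bool × Nat) (j : Nat) : Bool × Nat :=
  if st.1 then
    if s.getD (j + i) 0 != nums.getD (st.2 + i) 0 then (false, st.2)
    else (true, (st.2 + 1) % k)
  else st

theorem pvCheckBlockA_eq_fold (nums s : List Int) (i k : Nat) :
    pvCheckBlockA nums s i k =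
      ((List.range k).foldl (pvStepA nums s i k) (true, pvFindCurr nums i k)).1 := rfl

-- A's inner fold: absorbing false
theorem foldA_false (nums s : List Int) (i k : Nat) (l : List Nat) (c : Nat) :
    ((l.foldl (pvStepA nums s i k) (false, c))).1 = false := by
  induction l generalizing c with
  | nil => rfl
  | cons j l ih => simpa [pvStepA] using ih c

-- A's inner fold characterization
theorem foldA_iff (nums s : List Int) (i k : Nat) (hk : 0 < k) :
    ∀ (m j c : Nat), c < k →
    ((((List.range' j m).foldl (pvStepA nums s i k) (true, c))).1 = true ↔
      ∀ t < m, s.getD ((j + t) + i) 0 = nums.getD ((c + t) % k + i) 0) := by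
  intro m
  induction m with
  | zero => intro j c _; simp
  | succ m ih =>
    intro j c hc
    rw [List.range'_succ, List.foldl_cons]
    by_cases hcond : s.getD (j + i) 0 = nums.getD (c + i) 0
    · have hne : (s.getD (j + i) 0 != nums.getD (c + i) 0) = false := by
        rw [hcond]; exact bne_self_eq_false _
      have hstep : pvStepA nums s i k (true, c) j = (true, (c + 1) % k) := by
        simp only [pvStepA, hne, Bool.false_eq_true, if_false, if_true]
      rw [hstep, ih (j + 1) ((c + 1) % k) (Nat.mod_lt _ hk)]
      constructor
      · intro h t ht
        rcases Nat.eq_zero_or_pos t with rfl | htpos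
        · simpa [Nat.mod_eq_of_lt hc] using hcond
        · obtain ⟨t', rfl⟩ := Nat.exists_eq_add_of_lt htpos
          have := h (0 + t') (by omega)
          have harith : ((c + 1) % k + (0 + t')) % k = (c + (0 + t' + 1)) % k := by
            rw [Nat.mod_add_mod]; congr 1; omega
          have hidx : j + 1 + (0 + t') = j + (0 + t' + 1) := by omega
          rw [hidx, harith] at this
          exact this
      · intro h t ht
        have := h (t + 1) (by omega)
        have harith : (c + (t + 1)) % k = ((c + 1) % k + t) % k := by
          rw [Nat.mod_add_mod]; congr 1; omega
        have hidx : j + (t + 1) = j + 1 + t := by omega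
        rw [hidx, harith] at this
        exact this
    · have hne : (s.getD (j + i) 0 != nums.getD (c + i) 0) = true := by
        simpa using hcond
      have hstep : pvStepA nums s i k (true, c) j = (false, c) := by
        simp only [pvStepA, hne, if_true]
      rw [hstep, foldA_false]
      simp only [Bool.false_eq_true, false_iff]
      intro hall
      apply hcond
      have := hall 0 (by omega)
      simpa [Nat.mod_eq_of_lt hc] using this

-- flag fold = all
theorem foldl_flag_false (g : Nat → Bool) (l : List Nat) :
    l.foldl (fun ok t => if ok then g t else ok) false = false := by
  induction l with
  | nil => rfl
  | cons x l ih => simpa using ih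

theorem foldl_flag_all (g : Nat → Bool) (l : List Nat) :
    l.foldl (fun ok t => if ok then g t else ok) true = l.all g := by
  induction l with
  | nil => rfl
  | cons x l ih =>
    simp only [List.foldl_cons, List.all_cons, if_true]
    by_cases hx : g x = true
    · simp [hx, ih]
    · simp only [Bool.not_eq_true] at hx
      simp [hx, foldl_flag_false]

-- two lists of length k agreeing on getD are equal
theorem eq_of_getD (l1 l2 : List Int) (k : Nat) (h1 : l1.length = k) (h2 : l2.length = k)
    (h : ∀ t < k, l1.getD t 0 = l2.getD t 0) : l1 = l2 := by
  apply List.ext_getElem (by omega)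
  intro n hn1 hn2
  have := h n (by omega)
  rwa [List.getD_eq_getElem _ _ hn1, List.getD_eq_getElem _ _ hn2] at this

theorem findCurr_lt (nums : List Int) (i k : Nat) (hk : 0 < k) : pvFindCurr nums i k < k := by
  unfold pvFindCurr
  cases hcase : (List.range' 1 (k - 1)).find?
      (fun j => decide (nums.getD (j - 1 + i) 0 > nums.getD (j + i) 0)) with
  | none => simpa using hk
  | some d =>
    have := List.mem_of_find?_eq_some hcase
    rw [List.mem_range'_1] at this
    simp only
    omega

-- getD monotonicity on a pairwise-sorted list
theorem getD_mono (ss : List Int) (k : Nat) (hss : ss.length = k)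
    (hsort : ss.Pairwise (· ≤ ·)) (p q : Nat) (hpq : p ≤ q) (hq : q < k) :
    ss.getD p 0 ≤ ss.getD q 0 := by
  rcases Nat.lt_or_ge p q with h | h
  · rw [List.pairwise_iff_getElem] at hsort
    have := hsort p q (by omega) (by omega) h
    rwa [List.getD_eq_getElem _ _ (by omega), List.getD_eq_getElem _ _ (by omega)]
  · have : p = q := by omega
    rw [this]

-- the easy direction: if ss is the curr-rotation of bb, bb is some rotation of ss
theorem rot_inv_exists (bb ss : List Int) (k c0 : Nat) (hk : 0 < k) (hbb : bb.length = k)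
    (hc0 : c0 < k) (h : ss = pvRot bb c0) : ∃ t, t < k ∧ pvRot ss t = bb := by
  rcases Nat.eq_zero_or_pos c0 with rfl | hpos
  · exact ⟨0, hk, by rw [h, pvRot_zero, pvRot_zero]⟩
  · refine ⟨k - c0, by omega, ?_⟩
    rw [h]
    have := pvRot_rot bb c0 (by omega)
    rwa [hbb] at this

-- the hard direction: if bb is a rotation of the sorted ss, then ss is the curr-rotation of bb
theorem rot_main (bb ss : List Int) (k t : Nat) (hk : 0 < k) (hbb : bb.length = k)
    (hss : ss.length = k) (hsort : ss.Pairwise (· ≤ ·)) (ht : t < k)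
    (hrot : pvRot ss t = bb) (c0 : Nat)
    (hcase : ((List.range' 1 (k - 1)).find? (fun j => decide (bb.getD (j - 1) 0 > bb.getD j 0))
        = some c0) ∨
      ((∀ j ∈ List.range' 1 (k - 1), ¬ (bb.getD (j - 1) 0 > bb.getD j 0)) ∧ c0 = 0)) :
    ss = pvRot bb c0 := by
  have hgetrot : ∀ j, j < k → bb.getD j 0 = ss.getD ((t + j) % k) 0 := by
    intro j hj
    rw [← hrot]
    exact getD_rot ss t j k hss ht hj
  rcases hcase with hfind | ⟨hnone, rfl⟩
  · -- a descent was found at c0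
    have hmem := List.mem_of_find?_eq_some hfind
    rw [List.mem_range'_1] at hmem
    have hdesc : bb.getD (c0 - 1) 0 > bb.getD c0 0 := by
      have := List.find?_some hfind
      simpa using this
    have htpos : 0 < t := by
      rcases Nat.eq_zero_or_pos t with rfl | htp
      · exfalso
        rw [pvRot_zero] at hrot
        subst hrot
        exact absurd (getD_mono ss k hss hsort (c0 - 1) c0 (by omega) (by omega))
          (by omega)
      · exact htp
    have hc0eq : c0 = k - t := by
      by_contra hne
      have ha : bb.getD (c0 - 1) 0 = ss.getD ((t + (c0 - 1)) % k) 0 :=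
        hgetrot (c0 - 1) (by omega)
      have hb : bb.getD c0 0 = ss.getD ((t + c0) % k) 0 := hgetrot c0 (by omega)
      have hconsec : (t + (c0 - 1)) % k + 1 = (t + c0) % k ∧ (t + c0) % k < k := by
        rcases Nat.lt_or_ge (t + c0) k with hlt | hge
        · rw [Nat.mod_eq_of_lt (by omega), Nat.mod_eq_of_lt hlt]
          omega
        · have hk2 : t + c0 < 2 * k := by omega
          have h1 : (t + (c0 - 1)) % k = t + c0 - 1 - k := by
            calc (t + (c0 - 1)) % k = (t + c0 - 1 - k + k) % k := by congr 1; omega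
              _ = (t + c0 - 1 - k) % k := Nat.add_mod_right _ _
              _ = t + c0 - 1 - k := Nat.mod_eq_of_lt (by omega)
          have h2 : (t + c0) % k = t + c0 - k := by
            calc (t + c0) % k = (t + c0 - k + k) % k := by congr 1; omega
              _ = (t + c0 - k) % k := Nat.add_mod_right _ _
              _ = t + c0 - k := Nat.mod_eq_of_lt (by omega)
          omega
      have := getD_mono ss k hss hsort ((t + (c0 - 1)) % k) ((t + c0) % k)
        (by omega) hconsec.2
      rw [← ha, ← hb] at this
      omega
    subst hc0eq
    rw [← hrot]
    have := pvRot_rot ss t (by omega)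
    rw [hss] at this
    exact this.symm
  · -- no descent: bb itself is sorted, hence equal to ss
    have hchain : bb.IsChain (· ≤ ·) := by
      rw [List.isChain_iff_getElem]
      intro p hp
      have hp' : p + 1 < k := by omega
      have := hnone (p + 1) (by rw [List.mem_range'_1]; omega)
      rw [List.getD_eq_getElem _ _ (by omega), List.getD_eq_getElem _ _ (by omega)] at this
      simpa using this
    have hbbsort : bb.Pairwise (· ≤ ·) := List.isChain_iff_pairwise.mp hchain
    have hperm : bb.Perm ss := hrot ▸ pvRot_perm ss t
    have hbe : bb = ss := hperm.eq_of_pairwise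
      (fun a b _ _ hab hba => le_antisymm hab hba) hbbsort hsort
    rw [pvRot_zero, hbe]

-- the block-level equivalence
theorem block_eq (nums s : List Int) (i k : Nat) (hk : 0 < k)
    (hs : s.length = nums.length) (hik : i + k ≤ nums.length)
    (hsort : s.Pairwise (· ≤ ·)) :
    pvCheckBlockA nums s i k = pvRotWindowB nums s i k := by
  have hik' : i + k ≤ s.length := by omega
  have hbb : ((nums.drop i).take k).length = k := length_slice_eq _ _ _ hik
  have hss : ((s.drop i).take k).length = k := length_slice_eq _ _ _ hik'
  have hgb : ∀ j, j < k → ((nums.drop i).take k).getD j 0 = nums.getD (j + i) 0 :=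
    fun j hj => getD_slice _ _ _ _ hik hj
  have hgs : ∀ j, j < k → ((s.drop i).take k).getD j 0 = s.getD (j + i) 0 :=
    fun j hj => getD_slice _ _ _ _ hik' hj
  have hsort' : ((s.drop i).take k).Pairwise (· ≤ ·) :=
    List.Pairwise.sublist ((List.take_sublist _ _).trans (List.drop_sublist ..)) hsort
  have hc0lt : pvFindCurr nums i k < k := findCurr_lt nums i k hk
  -- the predicate of pvFindCurr, moved to the slice
  have hfind : pvFindCurr nums i k =
      (match (List.range' 1 (k - 1)).find?
          (fun j => decide (((nums.drop i).take k).getD (j - 1) 0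
            > ((nums.drop i).take k).getD j 0)) with
        | some j => j
        | none => 0) := by
    unfold pvFindCurr
    rw [find?_congr_mem _ _ _ ?_]
    intro j hj
    rw [List.mem_range'_1] at hj
    rw [hgb (j - 1) (by omega), hgb j (by omega)]
  -- characterization of side A
  have hAiff : (pvCheckBlockA nums s i k = true) ↔
      (s.drop i).take k = pvRot ((nums.drop i).take k) (pvFindCurr nums i k) := by
    rw [pvCheckBlockA_eq_fold, List.range_eq_range',
      foldA_iff nums s i k hk k 0 (pvFindCurr nums i k) hc0lt]
    constructor
    · intro h
      refine eq_of_getD _ _ k hss (by simp [pvRot]; omega) ?_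
      intro u hu
      have hmod : (pvFindCurr nums i k + u) % k < k := Nat.mod_lt _ hk
      rw [hgs u hu, getD_rot _ _ _ k hbb hc0lt hu, hgb _ hmod]
      have := h u hu
      rwa [Nat.zero_add] at this
    · intro h u hu
      have hmod : (pvFindCurr nums i k + u) % k < k := Nat.mod_lt _ hk
      rw [Nat.zero_add, ← hgs u hu, h, getD_rot _ _ _ k hbb hc0lt hu, hgb _ hmod]
  -- characterization of side B
  have hBiff : (pvRotWindowB nums s i k = true) ↔
      ∃ u, u < k ∧ pvRot ((s.drop i).take k) u = (nums.drop i).take k := by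
    unfold pvRotWindowB
    simp only [List.any_eq_true, List.mem_range, beq_iff_eq]
    constructor
    · rintro ⟨u, hu, hw⟩
      rw [window_eq_rot _ k u hss hu] at hw
      exact ⟨u, hu, hw⟩
    · rintro ⟨u, hu, hw⟩
      exact ⟨u, hu, by rw [window_eq_rot _ k u hss hu]; exact hw⟩
  -- combine
  rw [Bool.eq_iff_iff, hAiff, hBiff]
  constructor
  · intro h
    exact rot_inv_exists _ _ k _ hk hbb hc0lt h
  · rintro ⟨u, hu, hw⟩
    refine rot_main _ _ k u hk hbb hss hsort' hu hw (pvFindCurr nums i k) ?_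
    cases hcase : (List.range' 1 (k - 1)).find?
        (fun j => decide (((nums.drop i).take k).getD (j - 1) 0
          > ((nums.drop i).take k).getD j 0)) with
    | some d =>
      left
      rw [hfind, hcase]
    | none =>
      right
      constructor
      · intro j hj
        have := List.find?_eq_none.mp hcase j hj
        simpa using this
      · rw [hfind, hcase]

theorem all_congr_mem (l : List Nat) (f g : Nat → Bool) (h : ∀ x ∈ l, f x = g x) :
    l.all f = l.all g := by
  induction l with
  | nil => rfl
  | cons x l ih =>
    simp only [List.all_cons]
    rw [h x (by simp), ih (fun y hy => h y (by simp [hy]))]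

theorem blocks_eq (nums s : List Int) (k : Nat) (hk1 : 1 ≤ k)
    (hkd : nums.length % k = 0) (hs : s.length = nums.length)
    (hsort : s.Pairwise (· ≤ ·)) :
    pvBlocksA nums s nums.length k = pvBlocksB nums s nums.length k := by
  unfold pvBlocksA pvBlocksB
  rw [foldl_flag_all]
  apply all_congr_mem
  intro t htmem
  rw [List.mem_range] at htmem
  apply block_eq nums s (t * k) k (by omega) hs ?_ hsort
  have hdvd : (nums.length / k) * k = nums.length :=
    Nat.div_mul_cancel (Nat.dvd_of_mod_eq_zero hkd)
  have hle : (t + 1) * k ≤ (nums.length / k) * k := Nat.mul_le_mul_right _ (by omega)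
  calc t * k + k = (t + 1) * k := by ring
    _ ≤ nums.length := by omega

theorem sortableIntegers_spec' : ∀ (nums : List Int),
    sortableIntegers nums = sortableIntegers_alt nums := by
  intro nums
  show (pvFactorsA nums.length).foldl (fun ans k =>
      if pvBlocksA nums (PySem.List.sorted nums (fun x => x) false) nums.length k
      then ans + (k : Int) else ans) 0 =
    (pvFactorsB nums.length).foldl (fun ans k =>
      if pvBlocksB nums (PySem.List.sorted nums (fun x => x) false) nums.length k
      then ans + (k : Int) else ans) 0
  have hfac : pvFactorsB nums.length = pvFactorsA nums.length := rfl
  rw [hfac]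
  apply PySem.List.foldl_congr_mem
  intro acc k hkmem
  obtain ⟨hk1, hkd⟩ := mem_pvFactorsA nums.length k hkmem
  rw [blocks_eq nums _ k hk1 hkd (PySem.List.length_sorted _ _ _)
    (by simpa using PySem.List.sorted_pairwise (xs := nums) (key := fun x => x))]

-- ===== VERDICT (by name: the statement is the Claim_ definition above) =====
theorem sortableIntegers_spec : Claim_equal_sortableIntegers := by
  intro nums _
  unfold Spec_sortableIntegers
  exact sortableIntegers_spec' nums
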